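-- pv_equiv track=rewrite | github.com/akshay-greenlang/Code-V1_GreenLang | greenlang/schema_migration/schema_versioner.py | _classify_bump
-- ===== SOURCE A (Python) =====
-- from typing import Any, Dict, List, Optional, Tuple
--
-- _BREAKING_SEVERITIES: frozenset[str] = frozenset(
--     {"breaking", "major", "breaking_change", "incompatible"}
-- )
--
-- _NON_BREAKING_SEVERITIES: frozenset[str] = frozenset(
--     {"non_breaking", "minor", "additive", "backward_compatible", "feature"}
-- )
--
-- BUMP_MAJOR = "major"
--
-- BUMP_MINOR = "minor"
--
-- BUMP_PATCH = "patch"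
--
-- def _classify_bump(changes: List[Dict[str, Any]]) -> str:
--     """Classify the required SemVer bump from a list of change descriptors.
--
--     Each change dict must contain at minimum a ``"severity"`` key whose value
--     is a string.  Classification precedence:
--
--     1. If any change has severity in ``_BREAKING_SEVERITIES`` → ``"major"``.
--     2. Elif any change has severity in ``_NON_BREAKING_SEVERITIES`` → ``"minor"``.
--     3. Otherwise (all cosmetic / unknown) → ``"patch"``.
--
--     An empty list returns ``"patch"`` (no meaningful changes).
--
--     Args:
--         changes: List of change descriptor dicts.  Each dict should have at
--             least a ``"severity"`` key; missing keys default to ``"patch"``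
--             severity behaviour.
--
--     Returns:
--         One of ``"major"``, ``"minor"``, or ``"patch"``.
--
--     Example:
--         >>> _classify_bump([{"severity": "non_breaking"}, {"severity": "cosmetic"}])
--         'minor'
--         >>> _classify_bump([{"severity": "breaking"}])
--         'major'
--         >>> _classify_bump([])
--         'patch'
--     """
--     has_minor = False
--     for change in changes:
--         sev = str(change.get("severity", "patch")).lower()
--         if sev in _BREAKING_SEVERITIES:
--             return BUMP_MAJOR
--         if sev in _NON_BREAKING_SEVERITIES:
--             has_minor = True
--     return BUMP_MINOR if has_minor else BUMP_PATCH
-- ===== SOURCE B (Python) =====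
-- _BREAKING_SEVERITIES = frozenset({"breaking", "major", "breaking_change", "incompatible"})
-- _NON_BREAKING_SEVERITIES = frozenset({"non_breaking", "minor", "additive", "backward_compatible", "feature"})
--
--
-- def _classify_bump(changes):
--     sevs = {str(c.get("severity", "patch")).lower() for c in changes}
--     if sevs & _BREAKING_SEVERITIES:
--         return "major"
--     if sevs & _NON_BREAKING_SEVERITIES:
--         return "minor"
--     return "patch"
-- ===== Notes on version B (the rewrite author's own statement) =====
-- stated objective: idiomatic
-- what changed: Replaces the fused early-exit loop with a has_minor flag by first materializing the set of normalized severities and then deciding via set intersections with the breaking/non-breaking sets.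
import Mathlib
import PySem

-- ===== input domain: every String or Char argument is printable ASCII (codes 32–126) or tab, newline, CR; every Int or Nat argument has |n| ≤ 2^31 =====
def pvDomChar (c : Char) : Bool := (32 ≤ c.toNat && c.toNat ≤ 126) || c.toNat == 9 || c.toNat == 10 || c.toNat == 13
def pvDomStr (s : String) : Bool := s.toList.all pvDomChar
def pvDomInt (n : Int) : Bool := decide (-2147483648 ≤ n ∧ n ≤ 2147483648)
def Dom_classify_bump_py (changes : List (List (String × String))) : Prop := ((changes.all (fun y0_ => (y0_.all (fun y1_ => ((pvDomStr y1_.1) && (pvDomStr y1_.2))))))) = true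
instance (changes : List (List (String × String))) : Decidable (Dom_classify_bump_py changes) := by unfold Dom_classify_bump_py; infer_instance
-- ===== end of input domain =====

-- B replaces A's fused early-exit loop by building the set of normalized severities once and
-- deciding with set intersections (idiomatic decomposition; same cost, same return values).

-- ===== PORT A =====
def pvBreaking : List String := ["breaking", "major", "breaking_change", "incompatible"]
def pvNonBreaking : List String := ["non_breaking", "minor", "additive", "backward_compatible", "feature"]

-- str(change.get("severity", "patch")).lower() — a subexpression both Pythons contain verbatim
def pvSev (c : List (String × String)) : String :=
  PySem.Str.lower ((PySem.Dict.mk c).getD "severity" "patch")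

-- the for-loop of A, with the `has_minor` flag as loop state and early return on a breaking severity
def classify_bump_py_go : List (List (String × String)) → Bool → String
  | [], has_minor => if has_minor then "minor" else "patch"
  | change :: rest, has_minor =>
      let sev := pvSev change
      if pvBreaking.contains sev then "major"
      else classify_bump_py_go rest (has_minor || pvNonBreaking.contains sev)

def classify_bump_py (changes : List (List (String × String))) : String :=
  classify_bump_py_go changes false

-- ===== PORT B =====
def classify_bump_py_alt (changes : List (List (String × String))) : String :=
  let sevs : PySem.Set String := PySem.Set.ofList (changes.map pvSev)
  if PySem.Set.inter sevs pvBreaking ≠ [] then "major"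
  else if PySem.Set.inter sevs pvNonBreaking ≠ [] then "minor"
  else "patch"

-- ===== PRECONDITION & SPEC =====
def Spec_classify_bump_py (changes : List (List (String × String))) (out : String) : Prop := out = classify_bump_py_alt changes
instance (changes : List (List (String × String))) (out : String) : Decidable (Spec_classify_bump_py changes out) := by unfold Spec_classify_bump_py; infer_instance

-- ===== CLAIM (what is proved, stated in full; the proofs are below) =====
def Claim_equal_classify_bump_py : Prop := ∀ (changes : List (List (String × String))), Dom_classify_bump_py changes → Spec_classify_bump_py changes (classify_bump_py changes)

-- ===== LEMMAS AND PROOFS =====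

-- a membership scan over a list equals nonemptiness of the intersection of its set with the other list
theorem pv_any_iff (xs t : List String) :
    (xs.any (fun s => t.contains s)) = true ↔ PySem.Set.inter (PySem.Set.ofList xs) t ≠ [] := by
  rw [List.any_eq_true]
  constructor
  · rintro ⟨x, hx, hxt⟩
    have h2 : x ∈ PySem.Set.inter (PySem.Set.ofList xs) t :=
      (PySem.Set.mem_inter _ _ _).2 ⟨(PySem.Set.mem_ofList _ _).2 hx, by simpa using hxt⟩
    exact List.ne_nil_of_mem h2
  · intro hne
    rcases List.exists_mem_of_ne_nil _ hne with ⟨y, hy⟩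
    rcases (PySem.Set.mem_inter _ _ _).1 hy with ⟨hys, hyt⟩
    exact ⟨y, (PySem.Set.mem_ofList _ _).1 hys, by simpa using hyt⟩

-- characterisation of A's loop in terms of the mapped severity list
theorem pv_go_char (changes : List (List (String × String))) (hm : Bool) :
    classify_bump_py_go changes hm =
      (if (changes.map pvSev).any (fun s => pvBreaking.contains s) then "major"
       else if hm || (changes.map pvSev).any (fun s => pvNonBreaking.contains s) then "minor"
       else "patch") := by
  induction changes generalizing hm with
  | nil => simp [classify_bump_py_go]
  | cons c rest ih =>
      simp only [classify_bump_py_go]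
      by_cases hb : pvSev c ∈ pvBreaking
      · simp [hb]
      · rw [if_neg (by simpa using hb), ih]
        simp [hb, or_assoc]

-- ===== VERDICT (by name: the statement is the Claim_ definition above) =====
theorem classify_bump_py_spec : Claim_equal_classify_bump_py := by
  intro changes _
  show classify_bump_py changes = classify_bump_py_alt changes
  unfold classify_bump_py classify_bump_py_alt
  rw [pv_go_char]
  simp only [Bool.false_or, pv_any_iff]
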